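-- pv_equiv track=rewrite | github.com/yuvanjali24012006/kitchenvision-ai | health_service.py | score_recipe
-- ===== SOURCE A (Python) =====
-- from typing import Tuple, Dict, Any
--
-- def score_recipe(recipe: Dict[str, Any]) -> Tuple[int, str]:
--     """Return (score 1-10, explanation string)."""
--     ingredients = [i.lower() for i in recipe.get("ingredients", [])]
--
--     # Simple heuristics
--     score = 6
--     explanation_parts = []
--
--     if any("vegetable" in i or "apple" in i or "banana" in i or "peas" in i for i in ingredients):
--         score += 1
--         explanation_parts.append("Includes produce → +1")
--
--     if any("butter" in i or "olive oil" in i for i in ingredients):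
--         score += 0  # neutral
--         explanation_parts.append("Contains fats → moderate impact")
--
--     if any("sugar" in i or "honey" in i or "maple" in i for i in ingredients):
--         score -= 1
--         explanation_parts.append("Contains sweetener → -1")
--
--     if any("eggs" in i for i in ingredients):
--         score += 0
--         explanation_parts.append("Protein source present")
--
--     score = max(1, min(10, score))
--
--     explanation = "; ".join(explanation_parts) or "Balanced—no strong positives/negatives detected."
--     # Add a short structured nutrition-like summary (mock)
--     explanation += f" | Estimated calories: ~{200 + 50 * len(ingredients)} kcal"
--
--     return score, explanation
-- ===== SOURCE B (Python) =====
-- def score_recipe(recipe):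
--     """Return (score 1-10, explanation string)."""
--     ingredients = [i.lower() for i in recipe.get("ingredients", [])]
--
--     # One pass: OR-in the four category flags per ingredient.
--     has_produce = has_fat = has_sweet = has_egg = False
--     for i in ingredients:
--         has_produce = has_produce or "vegetable" in i or "apple" in i or "banana" in i or "peas" in i
--         has_fat = has_fat or "butter" in i or "olive oil" in i
--         has_sweet = has_sweet or "sugar" in i or "honey" in i or "maple" in i
--         has_egg = has_egg or "eggs" in i
--
--     score = 6 + (1 if has_produce else 0) - (1 if has_sweet else 0)
--
--     parts = []
--     if has_produce:
--         parts.append("Includes produce → +1")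
--     if has_fat:
--         parts.append("Contains fats → moderate impact")
--     if has_sweet:
--         parts.append("Contains sweetener → -1")
--     if has_egg:
--         parts.append("Protein source present")
--
--     explanation = "; ".join(parts) or "Balanced—no strong positives/negatives detected."
--     explanation += f" | Estimated calories: ~{200 + 50 * len(ingredients)} kcal"
--     return score, explanation
-- ===== Notes on version B (the rewrite author's own statement) =====
-- stated objective: alternative
-- what changed: B replaces A's four separate any() scans over the ingredient list with a single loop that ORs four boolean category flags per ingredient, then derives the score arithmetically from the flags (dropping the provably no-op clamp) and emits the messages from the flags.
import Mathlib
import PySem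

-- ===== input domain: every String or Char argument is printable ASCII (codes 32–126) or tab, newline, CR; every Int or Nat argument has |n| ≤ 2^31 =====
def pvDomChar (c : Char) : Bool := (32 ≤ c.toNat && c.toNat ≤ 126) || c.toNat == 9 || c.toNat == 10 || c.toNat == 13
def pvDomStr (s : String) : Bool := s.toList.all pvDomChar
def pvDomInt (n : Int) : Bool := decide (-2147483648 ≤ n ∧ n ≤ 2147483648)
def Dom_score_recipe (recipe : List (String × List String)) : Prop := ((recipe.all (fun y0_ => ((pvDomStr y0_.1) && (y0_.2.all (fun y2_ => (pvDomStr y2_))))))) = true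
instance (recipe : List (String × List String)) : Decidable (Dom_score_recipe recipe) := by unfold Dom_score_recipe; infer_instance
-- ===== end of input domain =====

-- B replaces A's four any() scans by a single loop OR-ing four boolean flags; score/messages derived from the flags.

-- shared helper: recipe.get("ingredients", []) — first-match association-list lookup
def pyGetIngredients (recipe : List (String × List String)) : List String :=
  match recipe with
  | [] => []
  | (k, v) :: rest => if k == "ingredients" then v else pyGetIngredients rest

-- ===== PORT A =====
def score_recipe (recipe : List (String × List String)) : Int × String :=
  let ingredients := (pyGetIngredients recipe).map PySem.Str.lower
  let score : Int := 6
  let parts : List String := []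
  let (score, parts) :=
    if ingredients.any (fun i => PySem.Str.isIn "vegetable" i || PySem.Str.isIn "apple" i ||
        PySem.Str.isIn "banana" i || PySem.Str.isIn "peas" i)
    then (score + 1, parts ++ ["Includes produce → +1"]) else (score, parts)
  let (score, parts) :=
    if ingredients.any (fun i => PySem.Str.isIn "butter" i || PySem.Str.isIn "olive oil" i)
    then (score + 0, parts ++ ["Contains fats → moderate impact"]) else (score, parts)
  let (score, parts) :=
    if ingredients.any (fun i => PySem.Str.isIn "sugar" i || PySem.Str.isIn "honey" i ||
        PySem.Str.isIn "maple" i)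
    then (score - 1, parts ++ ["Contains sweetener → -1"]) else (score, parts)
  let (score, parts) :=
    if ingredients.any (fun i => PySem.Str.isIn "eggs" i)
    then (score + 0, parts ++ ["Protein source present"]) else (score, parts)
  let score := max 1 (min 10 score)
  let joined := PySem.Str.join "; " parts
  let explanation := if joined == "" then "Balanced—no strong positives/negatives detected." else joined
  let explanation := explanation ++ " | Estimated calories: ~" ++
    PySem.Int.toStr (200 + 50 * PySem.List.len ingredients) ++ " kcal"
  (score, explanation)

-- ===== PORT B =====
def score_recipe_alt (recipe : List (String × List String)) : Int × String :=
  let ingredients := (pyGetIngredients recipe).map PySem.Str.lower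
  let flags := ingredients.foldl
    (fun (f : Bool × Bool × Bool × Bool) i =>
      (f.1 || (PySem.Str.isIn "vegetable" i || PySem.Str.isIn "apple" i ||
         PySem.Str.isIn "banana" i || PySem.Str.isIn "peas" i),
       f.2.1 || (PySem.Str.isIn "butter" i || PySem.Str.isIn "olive oil" i),
       f.2.2.1 || (PySem.Str.isIn "sugar" i || PySem.Str.isIn "honey" i || PySem.Str.isIn "maple" i),
       f.2.2.2 || PySem.Str.isIn "eggs" i))
    (false, false, false, false)
  let score : Int := 6 + (if flags.1 then 1 else 0) - (if flags.2.2.1 then 1 else 0)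
  let parts : List String :=
    (if flags.1 then ["Includes produce → +1"] else []) ++
    (if flags.2.1 then ["Contains fats → moderate impact"] else []) ++
    (if flags.2.2.1 then ["Contains sweetener → -1"] else []) ++
    (if flags.2.2.2 then ["Protein source present"] else [])
  let joined := PySem.Str.join "; " parts
  let explanation := if joined == "" then "Balanced—no strong positives/negatives detected." else joined
  let explanation := explanation ++ " | Estimated calories: ~" ++
    PySem.Int.toStr (200 + 50 * PySem.List.len ingredients) ++ " kcal"
  (score, explanation)

-- ===== PRECONDITION & SPEC =====
def Spec_score_recipe (recipe : List (String × List String)) (out : Int × String) : Prop := out = score_recipe_alt recipe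
instance (recipe : List (String × List String)) (out : Int × String) : Decidable (Spec_score_recipe recipe out) := by unfold Spec_score_recipe; infer_instance

-- ===== CLAIM (what is proved, stated in full; the proofs are below) =====
def Claim_equal_score_recipe : Prop := ∀ (recipe : List (String × List String)), Dom_score_recipe recipe → Spec_score_recipe recipe (score_recipe recipe)

-- ===== LEMMAS AND PROOFS =====

-- B's single fold of the four flags equals the four any-scans A performs.
theorem foldl_flags_eq (l : List String)
    (p q r s : String → Bool) (a b c d : Bool) :
    l.foldl (fun (f : Bool × Bool × Bool × Bool) i =>
      (f.1 || p i, f.2.1 || q i, f.2.2.1 || r i, f.2.2.2 || s i)) (a, b, c, d)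
    = (a || l.any p, b || l.any q, c || l.any r, d || l.any s) := by
  induction l generalizing a b c d with
  | nil => simp
  | cons x xs ih =>
    simp only [List.foldl_cons, List.any_cons, ih]
    simp [Bool.or_assoc]

theorem score_recipe_eq (recipe : List (String × List String)) :
    score_recipe recipe = score_recipe_alt recipe := by
  unfold score_recipe score_recipe_alt
  simp only [foldl_flags_eq]
  simp only [Bool.false_or]
  set ingredients := (pyGetIngredients recipe).map PySem.Str.lower with hing
  cases h1 : ingredients.any (fun i => PySem.Str.isIn "vegetable" i || PySem.Str.isIn "apple" i ||
        PySem.Str.isIn "banana" i || PySem.Str.isIn "peas" i) <;>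
  cases h2 : ingredients.any (fun i => PySem.Str.isIn "butter" i || PySem.Str.isIn "olive oil" i) <;>
  cases h3 : ingredients.any (fun i => PySem.Str.isIn "sugar" i || PySem.Str.isIn "honey" i ||
        PySem.Str.isIn "maple" i) <;>
  cases h4 : ingredients.any (fun i => PySem.Str.isIn "eggs" i) <;>
  simp [PySem.Str.join]

-- ===== VERDICT (by name: the statement is the Claim_ definition above) =====
theorem score_recipe_spec : Claim_equal_score_recipe := by
  intro recipe _
  exact score_recipe_eq recipe
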